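-- pv_equiv track=rewrite | github.com/VyuginAK/Python_lab_work | LabWork1/Task6-8.py | find_min_natural
-- ===== SOURCE A (Python) =====
-- def find_min_natural(s):
--     min_num = None  # Начальное значение минимального числа
--     current_num = ""  # Здесь будем собирать текущее число
--
--     for char in s + " ":  # Добавляем пробел в конец для обработки последнего числа
--         if char.isdigit():
--             current_num += char  # Добавляем к текущему числу
--         else:
--             # Если собрали какое-то число
--             if current_num:
--                 num = int(current_num)
--                 if num > 0:
--                     # Если это первое найденное число или оно меньше текущего минимума
--                     if min_num is None or num < min_num:
--                         min_num = num
--                 current_num = ""  # Сбрасываем текущее число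
--
--     return min_num  # Возвращаем минимальное число (или None, если не нашли)
-- ===== SOURCE B (Python) =====
-- def find_min_natural(s):
--     # Tokenize-then-reduce pipeline: blank out non-digits, split into digit runs,
--     # convert, keep positives, take the minimum.
--     masked = "".join(c if c.isdigit() else " " for c in s)
--     positives = [n for n in map(int, masked.split()) if n > 0]
--     return min(positives) if positives else None
-- ===== Notes on version B (the rewrite author's own statement) =====
-- stated objective: idiomatic
-- what changed: Replaces A's per-character accumulator state machine (building current_num and updating the running minimum inline) with a tokenize-then-reduce pipeline: mask non-digits to spaces, split into digit runs, map int, filter positives, min.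
import Mathlib
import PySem

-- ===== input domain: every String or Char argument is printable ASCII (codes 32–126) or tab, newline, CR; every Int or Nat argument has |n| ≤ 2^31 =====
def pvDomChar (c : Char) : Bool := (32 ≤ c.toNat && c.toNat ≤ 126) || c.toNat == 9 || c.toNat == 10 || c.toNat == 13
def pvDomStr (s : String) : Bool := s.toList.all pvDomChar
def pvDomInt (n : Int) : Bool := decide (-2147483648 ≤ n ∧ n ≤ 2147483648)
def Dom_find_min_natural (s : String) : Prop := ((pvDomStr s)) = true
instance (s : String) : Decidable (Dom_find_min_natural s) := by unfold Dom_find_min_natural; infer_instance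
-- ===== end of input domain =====

-- B replaces A's per-character accumulator state machine with an idiomatic
-- tokenize-then-reduce pipeline (mask non-digits, split, map int, filter positives, min).


-- ===== PORT A =====
-- 'if num > 0: if min_num is None or num < min_num: min_num = num'
def pvUpd (mn : Option Int) (num : Int) : Option Int :=
  if 0 < num then
    match mn with
    | none => some num
    | some m => if num < m then some num else some m
  else mn

-- one iteration of A's 'for char in s + " "' loop; state = (min_num, current_num)
def pvStepA (st : Option Int × List Char) (c : Char) : Option Int × List Char :=
  if PySem.Chars.isdigit c then (st.1, st.2 ++ [c])
  else if st.2 ≠ [] then (pvUpd st.1 ((PySem.Int.ofChars? st.2).getD 0), [])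
  else st

def find_min_natural (s : String) : Option Int :=
  ((s.toList ++ [' ']).foldl pvStepA (none, [])).1

-- ===== PORT B =====
-- int(t); total here: every token is a nonempty run of ASCII digits
def pvNum (t : List Char) : Int := (PySem.Int.ofChars? t).getD 0

-- ''.join(c if c.isdigit() else ' ' for c in s)
def pvMask (cs : List Char) : List Char := cs.map (fun c => if PySem.Chars.isdigit c then c else ' ')

def find_min_natural_alt (s : String) : Option Int :=
  let positives := ((PySem.Chars.split₀ (pvMask s.toList)).map pvNum).filter (fun n => 0 < n)
  PySem.List.min? positives (fun n => n)

-- ===== PRECONDITION & SPEC =====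
def Spec_find_min_natural (s : String) (out : Option Int) : Prop := out = find_min_natural_alt s
instance (s : String) (out : Option Int) : Decidable (Spec_find_min_natural s out) := by unfold Spec_find_min_natural; infer_instance

-- ===== CLAIM (what is proved, stated in full; the proofs are below) =====
def Claim_equal_find_min_natural : Prop := ∀ (s : String), Dom_find_min_natural s → Spec_find_min_natural s (find_min_natural s)

-- ===== LEMMAS AND PROOFS =====

-- tokenizer without the result accumulator: what split₀.go produces after acc.reverse
def pvToks : List Char → List Char → List (List Char)
  | [], cur => if cur.isEmpty then [] else [cur.reverse]
  | c :: rest, cur =>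
      if PySem.Chars.isspace c then
        if cur.isEmpty then pvToks rest [] else cur.reverse :: pvToks rest []
      else pvToks rest (c :: cur)

theorem pv_go_eq (s cur acc) :
    PySem.Chars.split₀.go s cur acc = acc.reverse ++ pvToks s cur := by
  induction s generalizing cur acc with
  | nil => simp [PySem.Chars.split₀.go, pvToks]; split_ifs <;> simp
  | cons c rest ih =>
      simp only [PySem.Chars.split₀.go, pvToks]
      split_ifs with h1 h2 <;> simp [ih]

theorem pv_digit_not_space (c : Char) (h : PySem.Chars.isdigit c = true) :
    PySem.Chars.isspace c = false := by
  simp only [PySem.Chars.isdigit, Bool.and_eq_true, decide_eq_true_eq, Char.le_def,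
    UInt32.le_iff_toNat_le, show ('0':Char).val.toNat = 48 from rfl,
    show ('9':Char).val.toNat = 57 from rfl] at h
  simp only [PySem.Chars.isspace, Char.toNat, Bool.or_eq_false_iff, Bool.and_eq_false_iff,
    decide_eq_false_iff_not]
  omega

def pvMinStep (acc : Option Int) (x : Int) : Option Int :=
  match acc with
  | none => some x
  | some m => if x < m then some x else some m

theorem pv_min_filter (xs : List Int) :
    PySem.List.min? (xs.filter (fun n => 0 < n)) (fun n : Int => n) = xs.foldl pvUpd none := by
  have e : PySem.List.min? (xs.filter (fun n => 0 < n)) (fun n : Int => n)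
      = (xs.filter (fun n => 0 < n)).foldl pvMinStep none := by
    unfold PySem.List.min?
    congr 1
    funext a b
    cases a <;> rfl
  rw [e]
  have key : ∀ (ys : List Int) (acc : Option Int),
      (ys.filter (fun n => 0 < n)).foldl pvMinStep acc = ys.foldl pvUpd acc := by
    intro ys
    induction ys with
    | nil => intro acc; rfl
    | cons y t ih =>
        intro acc
        by_cases hy : 0 < y <;> simp [hy, ih, pvUpd, pvMinStep]
  exact key xs none

theorem pv_main (cs : List Char) (mn : Option Int) (cur : List Char) :
    ((cs ++ [' ']).foldl pvStepA (mn, cur)).1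
      = ((pvToks (pvMask cs) cur.reverse).map pvNum).foldl pvUpd mn := by
  induction cs generalizing mn cur with
  | nil =>
      rcases cur with _ | ⟨x, t⟩ <;>
        simp [pvStepA, pvMask, pvToks, PySem.Chars.isdigit, pvNum, pvUpd]
  | cons c rest ih =>
      by_cases hd : PySem.Chars.isdigit c = true
      · have hs := pv_digit_not_space c hd
        simp only [pvMask, List.map_cons, List.cons_append, List.foldl_cons, pvStepA, hd,
          if_true, pvToks, hs, if_false, Bool.false_eq_true]
        have : c :: cur.reverse = (cur ++ [c]).reverse := by simp
        rw [this]
        exact ih mn (cur ++ [c])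
      · have hsp : PySem.Chars.isspace ' ' = true := by decide
        rcases h0 : cur with _ | ⟨x, t⟩
        · simp only [pvMask, List.map_cons, hd, if_false, List.cons_append, List.foldl_cons,
            pvStepA, Bool.false_eq_true, pvToks, hsp, if_true, List.reverse_nil,
            List.isEmpty_nil]
          simpa using ih mn []
        · simp only [pvMask, List.map_cons, hd, if_false, List.cons_append, List.foldl_cons,
            pvStepA, Bool.false_eq_true, pvToks, hsp, if_true]
          have hne : (x :: t) ≠ ([] : List Char) := by simp
          simp only [hne, ne_eq]
          have hrev : ((x :: t).reverse.isEmpty) = false := by simp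
          simp only [hrev, Bool.false_eq_true, if_false, List.reverse_reverse,
            List.map_cons, List.foldl_cons]
          simpa [pvNum] using ih (pvUpd mn ((PySem.Int.ofChars? (x :: t)).getD 0)) []

-- ===== VERDICT (by name: the statement is the Claim_ definition above) =====
theorem find_min_natural_spec : Claim_equal_find_min_natural := by
  intro s _
  unfold Spec_find_min_natural find_min_natural find_min_natural_alt
  rw [pv_min_filter]
  have h1 : PySem.Chars.split₀ (pvMask s.toList) = pvToks (pvMask s.toList) [] := by
    simpa using pv_go_eq (pvMask s.toList) [] []
  rw [h1]
  simpa using pv_main s.toList none []
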